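-- pv_equiv track=rewrite | github.com/Sautie/PyMixTools1 | greedStable.py | DegreesR
-- ===== SOURCE A (Python) =====
-- def Degree(Mat,i):
--     d=0;
--     for j in range(len(Mat[i])):
--         d=d+Mat[i][j]
--     return d
--
-- def DegreesR(Mat):
--     rows = len(Mat)
--     degrees = []
--     for i in range(rows):
--         degrees.append(Degree(Mat,i))
--     pos = []
--     pos=sorted(range(len(degrees)), key=lambda k: degrees[k])
--     degrees.sort()
--     return pos,degrees
-- ===== SOURCE B (Python) =====
-- def DegreesR(Mat):
--     pending = [(sum(row), i) for i, row in enumerate(Mat)]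
--     pos, degs = [], []
--     while pending:
--         d, i = min(pending)
--         pending.remove((d, i))
--         pos.append(i)
--         degs.append(d)
--     return pos, degs
-- ===== Notes on version B (the rewrite author's own statement) =====
-- stated objective: alternative
-- what changed: A builds a degrees list and calls the library sort twice (an index argsort keyed by degrees[k], then degrees.sort()); B never sorts: it does a selection scan, repeatedly extracting the lexicographically minimal (degree, index) pair from the pending pool and appending its index and degree to the outputs.
import Mathlib
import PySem

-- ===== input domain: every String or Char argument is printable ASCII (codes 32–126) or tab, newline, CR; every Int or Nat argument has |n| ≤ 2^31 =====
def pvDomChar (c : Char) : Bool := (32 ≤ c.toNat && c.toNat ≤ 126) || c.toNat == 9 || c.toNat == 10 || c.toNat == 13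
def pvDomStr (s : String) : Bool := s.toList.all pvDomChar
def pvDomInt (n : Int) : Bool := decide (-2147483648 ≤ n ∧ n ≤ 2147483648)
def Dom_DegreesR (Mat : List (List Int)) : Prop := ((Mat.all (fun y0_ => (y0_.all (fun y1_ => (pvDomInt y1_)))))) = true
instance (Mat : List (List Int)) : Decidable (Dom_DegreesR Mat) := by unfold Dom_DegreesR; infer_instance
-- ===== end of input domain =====

-- B replaces A's two library sorts (an index argsort keyed by degrees[k], plus degrees.sort())
-- by a sort-free selection scan: repeatedly extract the lexicographically minimal (degree, index)
-- pair from the pending pool (alternative algorithm, similar size; quadratic in the row count).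


-- ===== PORT A =====
-- helper Degree(Mat, i); every call has 0 ≤ i < len(Mat), so the pyGetD default [] is never read
def DegreePort (Mat : List (List Int)) (i : Int) : Int :=
  let row := PySem.List.pyGetD Mat i []
  (PySem.List.pyRange 0 (PySem.List.len row)).foldl (fun d j => d + PySem.List.pyGetD row j 0) 0

def DegreesR (Mat : List (List Int)) : List Int × List Int :=
  let rows := PySem.List.len Mat
  let degrees := (PySem.List.pyRange 0 rows).foldl (fun acc i => acc ++ [DegreePort Mat i]) []
  let pos := PySem.List.sorted (PySem.List.pyRange 0 (PySem.List.len degrees))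
      (fun k => PySem.List.pyGetD degrees k 0)
  (pos, PySem.List.sorted degrees (fun x => x))

-- ===== PORT B =====
-- Python's '<' on the (degree, index) tuples: lexicographic
def pvLexLt (p q : Int × Int) : Bool := decide (p.1 < q.1) || (p.1 == q.1 && decide (p.2 < q.2))

-- min(pending): Python's running-minimum fold (keeps the current element on ties)
def pvMinPair (p : Int × Int) (rest : List (Int × Int)) : Int × Int :=
  rest.foldl (fun m x => if pvLexLt x m then x else m) p

-- termination helper for the while loop: pending.remove shortens pending
lemma pvRemove?_length {α : Type} [BEq α] [LawfulBEq α] (xs : List α) (v : α) (r : List α)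
    (h : PySem.List.remove? xs v = some r) : r.length < xs.length := by
  have hv : v ∈ xs := by
    by_contra hv
    rw [(PySem.List.remove?_eq_none_iff xs v).2 hv] at h
    cases h
  rw [PySem.List.remove?_eq_some_erase xs v hv] at h
  obtain rfl : xs.erase v = r := Option.some.inj h
  have h1 := List.length_erase_of_mem hv
  have h2 : 0 < xs.length := List.length_pos_of_mem hv
  omega

-- the while loop: extract min, remove it, append index and degree
def pvSelLoop (pending : List (Int × Int)) : List Int × List Int :=
  match pending with
  | [] => ([], [])
  | p :: rest =>
    let m := pvMinPair p rest
    match hr : PySem.List.remove? (p :: rest) m with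
    | none => ([], [])   -- unreachable: the minimum is a member of pending
    | some pending' =>
      let r := pvSelLoop pending'
      (m.2 :: r.1, m.1 :: r.2)
termination_by pending.length
decreasing_by exact pvRemove?_length _ _ _ hr

def DegreesR_alt (Mat : List (List Int)) : List Int × List Int :=
  pvSelLoop ((PySem.List.enumerate Mat).map (fun p => (p.2.sum, p.1)))

-- ===== PRECONDITION & SPEC =====
def Spec_DegreesR (Mat : List (List Int)) (out : List Int × List Int) : Prop := out = DegreesR_alt Mat
instance (Mat : List (List Int)) (out : List Int × List Int) : Decidable (Spec_DegreesR Mat out) := by unfold Spec_DegreesR; infer_instance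

-- ===== CLAIM (what is proved, stated in full; the proofs are below) =====
def Claim_equal_DegreesR : Prop := ∀ (Mat : List (List Int)), Dom_DegreesR Mat → Spec_DegreesR Mat (DegreesR Mat)

-- ===== LEMMAS AND PROOFS =====

-- basic facts about the lexicographic comparison
lemma lexLt_irrefl (a : Int × Int) : pvLexLt a a = false := by
  simp [pvLexLt]

lemma lexLt_asymm {a b : Int × Int} (h : pvLexLt a b = true) : pvLexLt b a = false := by
  simp only [pvLexLt, Bool.or_eq_true, Bool.and_eq_true, beq_iff_eq, decide_eq_true_eq] at h
  simp only [pvLexLt, Bool.or_eq_false_iff, Bool.and_eq_false_iff, beq_eq_false_iff_ne,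
    decide_eq_false_iff_not]
  omega

lemma lexLt_nle_trans {a b c : Int × Int} (h1 : pvLexLt b a = false) (h2 : pvLexLt c b = false) :
    pvLexLt c a = false := by
  simp only [pvLexLt, Bool.or_eq_false_iff, Bool.and_eq_false_iff, beq_eq_false_iff_ne,
    decide_eq_false_iff_not] at *
  omega

lemma lexLt_lt_of_nle {a b c : Int × Int} (h1 : pvLexLt a b = true) (h2 : pvLexLt c b = false) :
    pvLexLt c a = false := by
  simp only [pvLexLt, Bool.or_eq_true, Bool.and_eq_true, beq_iff_eq, decide_eq_true_eq] at h1
  simp only [pvLexLt, Bool.or_eq_false_iff, Bool.and_eq_false_iff, beq_eq_false_iff_ne,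
    decide_eq_false_iff_not] at *
  omega

lemma lexLt_nle_of_lt {a b c : Int × Int} (h1 : pvLexLt a b = true) (h2 : pvLexLt a c = false) :
    pvLexLt b c = false := by
  simp only [pvLexLt, Bool.or_eq_true, Bool.and_eq_true, beq_iff_eq, decide_eq_true_eq] at h1
  simp only [pvLexLt, Bool.or_eq_false_iff, Bool.and_eq_false_iff, beq_eq_false_iff_ne,
    decide_eq_false_iff_not] at *
  omega

lemma lexLt_of_nle_of_ne {a b : Int × Int} (h : pvLexLt b a = false) (hne : a.2 ≠ b.2) :
    pvLexLt a b = true := by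
  simp only [pvLexLt, Bool.or_eq_false_iff, Bool.and_eq_false_iff, beq_eq_false_iff_ne,
    decide_eq_false_iff_not] at h
  simp only [pvLexLt, Bool.or_eq_true, Bool.and_eq_true, beq_iff_eq, decide_eq_true_eq]
  omega

-- pvMinPair returns a member that no element of the pool lexicographically precedes
lemma pvMinPair_spec (p : Int × Int) (rest : List (Int × Int)) :
    pvMinPair p rest ∈ p :: rest ∧ ∀ y ∈ p :: rest, pvLexLt y (pvMinPair p rest) = false := by
  induction rest generalizing p with
  | nil => exact ⟨by simp [pvMinPair], by simp [pvMinPair, lexLt_irrefl]⟩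
  | cons x t ih =>
    have hstep : pvMinPair p (x :: t) = pvMinPair (if pvLexLt x p then x else p) t := by
      simp [pvMinPair]
    set p' := if pvLexLt x p then x else p with hp'
    rcases ih p' with ⟨hmem, hmin⟩
    rw [hstep]
    constructor
    · rcases List.mem_cons.1 hmem with h | h
      · rw [h, hp']; split_ifs <;> simp
      · simp [h]
    · intro y hy
      have hminp' : pvLexLt p' (pvMinPair p' t) = false := hmin p' (by simp)
      rcases List.mem_cons.1 hy with hyp | hy'
      · -- y = p : either p' = p, or p' = x with pvLexLt x p
        rw [hyp]
        by_cases hxp : pvLexLt x p = true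
        · have hpe : p' = x := by rw [hp']; simp [hxp]
          exact lexLt_nle_of_lt (show pvLexLt p' p = true from hpe ▸ hxp) hminp'
        · have hpe : p' = p := by rw [hp']; simp [hxp]
          exact hpe ▸ hminp'
      · rcases List.mem_cons.1 hy' with hyx | hy''
        · -- y = x
          rw [hyx]
          by_cases hxp : pvLexLt x p = true
          · have hpe : p' = x := by rw [hp']; simp [hxp]
            exact hpe ▸ hminp'
          · have hpe : p' = p := by rw [hp']; simp [hxp]
            have hxx : pvLexLt x p' = false := by rw [hpe]; simpa using hxp
            exact lexLt_nle_trans hminp' hxx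
        · exact hmin y (by simp [hy''])

-- insertBy with the lex comparator preserves "no later element precedes an earlier one"
lemma insertBy_pairwise_nle (x : Int × Int) (ys : List (Int × Int))
    (h : ys.Pairwise (fun a c => pvLexLt c a = false)) :
    (PySem.List.insertBy pvLexLt x ys).Pairwise (fun a c => pvLexLt c a = false) := by
  induction ys with
  | nil => simp [PySem.List.insertBy]
  | cons y t ih =>
    rcases List.pairwise_cons.1 h with ⟨hy, ht⟩
    simp only [PySem.List.insertBy]
    split_ifs with hb
    · refine List.pairwise_cons.2 ⟨?_, h⟩
      intro z hz
      rcases List.mem_cons.1 hz with rfl | hz'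
      · exact lexLt_asymm hb
      · exact lexLt_lt_of_nle hb (hy z hz')
    · refine List.pairwise_cons.2 ⟨?_, ih ht⟩
      intro z hz
      rcases (PySem.List.mem_insertBy _ _ _ _).1 hz with rfl | hz'
      · simpa using hb
      · exact hy z hz'

lemma insertBy_perm {α : Type} (b : α → α → Bool) (x : α) (ys : List α) :
    (PySem.List.insertBy b x ys).Perm (x :: ys) := by
  induction ys with
  | nil => simp [PySem.List.insertBy]
  | cons y t ih =>
    simp only [PySem.List.insertBy]
    split_ifs with hb
    · exact List.Perm.refl _
    · exact (List.Perm.cons y ih).trans (List.Perm.swap x y t)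

-- the lex insertion sort used as the canonical sorted rearrangement
def pvLexSort (ps : List (Int × Int)) : List (Int × Int) :=
  ps.foldl (fun acc x => PySem.List.insertBy pvLexLt x acc) []

lemma foldl_insertBy_perm (ps acc : List (Int × Int)) :
    (ps.foldl (fun acc x => PySem.List.insertBy pvLexLt x acc) acc).Perm (acc ++ ps) := by
  induction ps generalizing acc with
  | nil => simp
  | cons x t ih =>
    simp only [List.foldl_cons]
    refine (ih _).trans ?_
    refine (List.Perm.append_right t (insertBy_perm pvLexLt x acc)).trans ?_
    exact (List.perm_middle).symm.trans (by simp)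

lemma pvLexSort_perm (ps : List (Int × Int)) : (pvLexSort ps).Perm ps := by
  simpa using foldl_insertBy_perm ps []

lemma foldl_insertBy_pairwise (ps acc : List (Int × Int))
    (ha : acc.Pairwise (fun a c => pvLexLt c a = false)) :
    (ps.foldl (fun acc x => PySem.List.insertBy pvLexLt x acc) acc).Pairwise
      (fun a c => pvLexLt c a = false) := by
  induction ps generalizing acc with
  | nil => exact ha
  | cons x t ih => exact ih _ (insertBy_pairwise_nle x acc ha)

lemma pvLexSort_pairwise (ps : List (Int × Int)) :
    (pvLexSort ps).Pairwise (fun a c => pvLexLt c a = false) :=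
  foldl_insertBy_pairwise ps [] (by simp)

-- with pairwise-distinct indices, "no later precedes earlier" strictifies to strict lex order
lemma pvLexSort_pairwise_lt (ps : List (Int × Int)) (hps : ps.Pairwise (fun a b => a.2 < b.2)) :
    (pvLexSort ps).Pairwise (fun a c => pvLexLt a c = true) := by
  have hne : ps.Pairwise (fun a b => a.2 ≠ b.2) := hps.imp (fun h => by omega)
  have hne' : (pvLexSort ps).Pairwise (fun a b => a.2 ≠ b.2) :=
    (List.Perm.pairwise_iff (fun h => h.symm) (pvLexSort_perm ps)).2 hne
  have := (pvLexSort_pairwise ps).and hne'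
  exact this.imp (fun ⟨h1, h2⟩ => lexLt_of_nle_of_ne h1 h2)

-- arbitrary-precondition selection lemma: the loop reproduces any strictly lex-sorted rearrangement
lemma selLoop_eq (n : ℕ) : ∀ (L T : List (Int × Int)), L.length ≤ n → T.Perm L →
    T.Pairwise (fun a c => pvLexLt a c = true) →
    pvSelLoop L = (T.map Prod.snd, T.map Prod.fst) := by
  induction n with
  | zero =>
    intro L T hlen hperm _
    have : L = [] := List.length_eq_zero_iff.1 (Nat.le_zero.1 hlen)
    subst this
    have : T = [] := List.Perm.eq_nil hperm
    subst this
    simp [pvSelLoop]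
  | succ n ih =>
    intro L T hlen hperm hpw
    cases L with
    | nil =>
      have : T = [] := List.Perm.eq_nil hperm
      subst this
      simp [pvSelLoop]
    | cons p rest =>
      rcases pvMinPair_spec p rest with ⟨hmem, hmin⟩
      set m := pvMinPair p rest with hm
      cases T with
      | nil => exact absurd (hperm.symm.eq_nil) (by simp)
      | cons t0 T' =>
        rcases List.pairwise_cons.1 hpw with ⟨ht0, hT'⟩
        -- the head of the sorted rearrangement is exactly the extracted minimum
        have hmt : m = t0 := by
          have hmT : m ∈ t0 :: T' := hperm.mem_iff.2 hmem
          rcases List.mem_cons.1 hmT with h | h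
          · exact h
          · have h1 : pvLexLt t0 m = true := ht0 m h
            have h2 : pvLexLt t0 m = false :=
              hmin t0 (hperm.mem_iff.1 (by simp))
            rw [h1] at h2; exact absurd h2 (by simp)
        have hmemL : m ∈ p :: rest := hmem
        have hrem : PySem.List.remove? (p :: rest) m = some ((p :: rest).erase m) :=
          PySem.List.remove?_eq_some_erase _ m hmemL
        have hperm' : T'.Perm ((p :: rest).erase m) := by
          rw [hmt]
          have h := hperm.erase t0
          rwa [List.erase_cons_head] at h
        have hlen' : ((p :: rest).erase m).length ≤ n := by
          have := List.length_erase_of_mem hmemL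
          simp only [List.length_cons] at this hlen
          omega
        have hrec := ih ((p :: rest).erase m) T' hlen' hperm' hT'
        rw [pvSelLoop, hrem]
        simp only [← hm]
        rw [hrec, hmt]
        simp

-- ==== characterisation of port A (degrees list, then the two sorts) ====

lemma insertBy_congr {α : Type} (b1 b2 : α → α → Bool) (x : α) (ys : List α)
    (h : ∀ y ∈ ys, b1 x y = b2 x y) :
    PySem.List.insertBy b1 x ys = PySem.List.insertBy b2 x ys := by
  induction ys with
  | nil => rfl
  | cons y t ih =>
    simp only [PySem.List.insertBy]
    rw [h y (by simp)]
    split_ifs with hb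
    · rfl
    · simpa using ih (fun z hz => h z (by simp [hz]))

lemma insertBy_map {α β : Type} (f : α → β) (bf : β → β → Bool) (x : α) (ys : List α) :
    PySem.List.insertBy bf (f x) (ys.map f)
      = (PySem.List.insertBy (fun a b => bf (f a) (f b)) x ys).map f := by
  induction ys with
  | nil => rfl
  | cons y t ih =>
    simp only [List.map_cons, PySem.List.insertBy]
    split_ifs with hb
    · rfl
    · simp [ih]

lemma foldl_insertBy_map {α β : Type} (f : α → β) (bf : β → β → Bool) (xs : List α) (acc : List α) :
    (xs.map f).foldl (fun acc x => PySem.List.insertBy bf x acc) (acc.map f)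
      = (xs.foldl (fun acc x => PySem.List.insertBy (fun a b => bf (f a) (f b)) x acc) acc).map f := by
  induction xs generalizing acc with
  | nil => rfl
  | cons x t ih =>
    simp only [List.map_cons, List.foldl_cons]
    rw [insertBy_map, ih]

lemma sorted_map {α β κ : Type} [LT κ] [DecidableLT κ] (f : α → β) (key : β → κ) (xs : List α) :
    PySem.List.sorted (xs.map f) key = (PySem.List.sorted xs (fun x => key (f x))).map f := by
  rw [PySem.List.sorted_eq_foldl_insertBy, PySem.List.sorted_eq_foldl_insertBy]
  exact foldl_insertBy_map f (fun a b => decide (key a < key b)) xs []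

lemma foldl_insertBy_key_congr {α κ : Type} [LT κ] [DecidableLT κ] (k1 k2 : α → κ)
    (xs acc : List α) (hx : ∀ x ∈ xs, k1 x = k2 x) (ha : ∀ y ∈ acc, k1 y = k2 y) :
    xs.foldl (fun acc x => PySem.List.insertBy (fun a b => decide (k1 a < k1 b)) x acc) acc
      = xs.foldl (fun acc x => PySem.List.insertBy (fun a b => decide (k2 a < k2 b)) x acc) acc := by
  induction xs generalizing acc with
  | nil => rfl
  | cons x t ih =>
    simp only [List.foldl_cons]
    have hx0 : k1 x = k2 x := hx x (by simp)
    have hins : PySem.List.insertBy (fun a b => decide (k1 a < k1 b)) x acc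
        = PySem.List.insertBy (fun a b => decide (k2 a < k2 b)) x acc := by
      apply insertBy_congr
      intro y hy
      rw [hx0, ha y hy]
    rw [hins]
    apply ih
    · intro z hz
      exact hx z (by simp [hz])
    · intro y hy
      rcases (PySem.List.mem_insertBy _ _ _ _).1 hy with h | h
      · rw [h]; exact hx0
      · exact ha y h

lemma sorted_key_congr {α κ : Type} [LT κ] [DecidableLT κ] (k1 k2 : α → κ) (xs : List α)
    (h : ∀ x ∈ xs, k1 x = k2 x) :
    PySem.List.sorted xs k1 = PySem.List.sorted xs k2 := by
  rw [PySem.List.sorted_eq_foldl_insertBy, PySem.List.sorted_eq_foldl_insertBy]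
  exact foldl_insertBy_key_congr k1 k2 xs [] h (by simp)

-- with strictly increasing indices, sorting by the degree alone equals the lex insertion sort
lemma foldl_insertBy_fst_lex (ps acc : List (Int × Int))
    (hp : ps.Pairwise (fun a b => a.2 < b.2))
    (ha : ∀ y ∈ acc, ∀ x ∈ ps, y.2 < x.2) :
    ps.foldl (fun acc x => PySem.List.insertBy (fun a b => decide (a.1 < b.1)) x acc) acc
      = ps.foldl (fun acc x => PySem.List.insertBy pvLexLt x acc) acc := by
  induction ps generalizing acc with
  | nil => rfl
  | cons x t ih =>
    simp only [List.foldl_cons]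
    have hins : PySem.List.insertBy (fun a b => decide (a.1 < b.1)) x acc
        = PySem.List.insertBy pvLexLt x acc := by
      apply insertBy_congr
      intro y hy
      have h2 : ¬ (x.2 < y.2) := by
        have := ha y hy x (by simp)
        omega
      simp only [pvLexLt]
      by_cases h1 : x.1 < y.1 <;> simp [h1, h2]
    rw [hins]
    rcases List.pairwise_cons.1 hp with ⟨hx, ht⟩
    apply ih
    · exact ht
    · intro y hy x' hx'
      rcases (PySem.List.mem_insertBy _ _ _ _).1 hy with h | h
      · rw [h]; exact hx x' hx'
      · exact ha y h x' (by simp [hx'])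

lemma sorted_fst_eq_lexSort (ps : List (Int × Int)) (hp : ps.Pairwise (fun a b => a.2 < b.2)) :
    PySem.List.sorted ps (fun p => p.1) = pvLexSort ps := by
  rw [PySem.List.sorted_eq_foldl_insertBy]
  exact foldl_insertBy_fst_lex ps [] hp (by simp)

lemma enum_map_fst {α : Type} (xs : List α) (s : Int) :
    (PySem.List.enumerate xs s).map Prod.fst = (List.range xs.length).map (fun k : Nat => s + (k : Int)) := by
  induction xs generalizing s with
  | nil => simp [PySem.List.enumerate]
  | cons x t ih =>
    rw [List.length_cons, List.range_succ_eq_map]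
    simp only [PySem.List.enumerate, List.map_cons, ih (s + 1), List.map_map]
    refine List.cons_eq_cons.2 ⟨by push_cast; ring, ?_⟩
    apply List.map_congr_left
    intro k _
    simp only [Function.comp_apply]
    push_cast
    ring

lemma enum_map_snd {α : Type} (xs : List α) (s : Int) :
    (PySem.List.enumerate xs s).map Prod.snd = xs := by
  induction xs generalizing s with
  | nil => rfl
  | cons x t ih => simp [PySem.List.enumerate, ih (s + 1)]

lemma mem_enum {α : Type} (xs : List α) (s : Int) (q : Int × α) (hq : q ∈ PySem.List.enumerate xs s) :
    ∃ k : Nat, q.1 = s + k ∧ xs[k]? = some q.2 := by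
  induction xs generalizing s with
  | nil => simp [PySem.List.enumerate] at hq
  | cons x t ih =>
    simp only [PySem.List.enumerate, List.mem_cons] at hq
    rcases hq with h | h
    · exact ⟨0, by simp [h]⟩
    · rcases ih (s + 1) h with ⟨k, hk1, hk2⟩
      exact ⟨k + 1, by push_cast; omega, by simpa using hk2⟩

lemma degrees_eq (Mat : List (List Int)) :
    (PySem.List.pyRange 0 (PySem.List.len Mat)).foldl (fun acc i => acc ++ [DegreePort Mat i]) []
      = Mat.map List.sum := by
  rw [PySem.List.foldl_append_singleton_eq_map]
  have h1 : ∀ i, DegreePort Mat i = (PySem.List.pyGetD Mat i []).sum := by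
    intro i
    simp only [DegreePort]
    rw [PySem.List.foldl_add, PySem.List.map_pyGetD_pyRange_zero]
    simp
  rw [List.nil_append,
    show DegreePort Mat = List.sum ∘ (fun i => PySem.List.pyGetD Mat i []) from funext h1,
    ← List.map_map, PySem.List.map_pyGetD_pyRange_zero]

lemma A_eq_lexSort (M : List (List Int)) :
    DegreesR M =
      ((pvLexSort ((PySem.List.enumerate M).map (fun p => (p.2.sum, p.1)))).map Prod.snd,
       (pvLexSort ((PySem.List.enumerate M).map (fun p => (p.2.sum, p.1)))).map Prod.fst) := by
  set ps : List (Int × Int) := (PySem.List.enumerate M).map (fun p => (p.2.sum, p.1)) with hps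
  have hA2 : ps.map Prod.fst = M.map List.sum := by
    rw [hps, List.map_map]
    rw [show (Prod.fst ∘ fun p : Int × List Int => (p.2.sum, p.1))
          = List.sum ∘ Prod.snd from rfl]
    rw [← List.map_map, enum_map_snd]
  have hA1 : ps.map Prod.snd = PySem.List.pyRange 0 (PySem.List.len M) := by
    rw [hps, List.map_map]
    rw [show (Prod.snd ∘ fun p : Int × List Int => (p.2.sum, p.1)) = Prod.fst from rfl]
    rw [enum_map_fst, PySem.List.len, PySem.List.pyRange_zero_natCast]
    apply List.map_congr_left
    intro k _
    omega
  have hA3 : ∀ p ∈ ps, PySem.List.pyGetD (M.map List.sum) p.2 0 = p.1 := by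
    intro p hp
    rw [hps, List.mem_map] at hp
    rcases hp with ⟨q, hq, rfl⟩
    rcases mem_enum M 0 q hq with ⟨k, hk1, hk2⟩
    simp only
    rw [hk1, zero_add, PySem.List.pyGetD_natCast]
    rw [List.getD_eq_getElem?_getD]
    simp [hk2]
  have hA4 : ps.Pairwise (fun a b => a.2 < b.2) := by
    rw [hps, List.pairwise_map]
    have h5 : ((PySem.List.enumerate M).map Prod.fst).Pairwise (· < ·) := by
      rw [enum_map_fst]
      rw [List.pairwise_map]
      exact List.pairwise_lt_range.imp (fun h => by omega)
    rw [List.pairwise_map] at h5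
    exact h5.imp (fun h => h)
  have hlen : PySem.List.len (M.map List.sum) = PySem.List.len M := by
    simp [PySem.List.len]
  have hpos : PySem.List.sorted (PySem.List.pyRange 0 (PySem.List.len M))
      (fun k => PySem.List.pyGetD (M.map List.sum) k 0)
      = (pvLexSort ps).map Prod.snd := by
    conv_lhs => rw [← hA1]
    rw [sorted_map Prod.snd (fun k => PySem.List.pyGetD (M.map List.sum) k 0) ps]
    rw [sorted_key_congr (fun p : Int × Int => PySem.List.pyGetD (M.map List.sum) p.2 0)
        (fun p : Int × Int => p.1) ps hA3]
    rw [sorted_fst_eq_lexSort ps hA4]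
  have hdegs : PySem.List.sorted (M.map List.sum) (fun x => x)
      = (pvLexSort ps).map Prod.fst := by
    conv_lhs => rw [← hA2]
    rw [sorted_map Prod.fst (fun x => x) ps]
    rw [show (fun x : Int × Int => Prod.fst x) = (fun p : Int × Int => p.1) from rfl]
    rw [sorted_fst_eq_lexSort ps hA4]
  show (PySem.List.sorted _ _, PySem.List.sorted _ _) = _
  simp only [degrees_eq M, hlen]
  rw [hpos, hdegs]

lemma main_eq (Mat : List (List Int)) : DegreesR Mat = DegreesR_alt Mat := by
  set ps : List (Int × Int) := (PySem.List.enumerate Mat).map (fun p => (p.2.sum, p.1)) with hps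
  have hA4 : ps.Pairwise (fun a b => a.2 < b.2) := by
    rw [hps, List.pairwise_map]
    have h5 : ((PySem.List.enumerate Mat).map Prod.fst).Pairwise (· < ·) := by
      rw [enum_map_fst, List.pairwise_map]
      exact List.pairwise_lt_range.imp (fun h => by omega)
    rw [List.pairwise_map] at h5
    exact h5.imp (fun h => h)
  have hB : DegreesR_alt Mat = ((pvLexSort ps).map Prod.snd, (pvLexSort ps).map Prod.fst) := by
    show pvSelLoop ps = _
    exact selLoop_eq ps.length ps (pvLexSort ps) le_rfl (pvLexSort_perm ps)
      (pvLexSort_pairwise_lt ps hA4)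
  rw [A_eq_lexSort, hB]

-- ===== VERDICT (by name: the statement is the Claim_ definition above) =====
theorem DegreesR_spec : Claim_equal_DegreesR := by
  intro Mat _
  show DegreesR Mat = DegreesR_alt Mat
  exact main_eq Mat
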